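-- pv_equiv track=rewrite | github.com/marhcouto/FEUP-FPRO | re11_1.py | days_until_empty
-- ===== SOURCE A (Python) =====
-- def days_until_empty(c, l):
--     capacity = c
--     i = 0
--     while capacity > 0:
--         capacity += l
--         if capacity > c:
--             capacity = c
--         capacity -= i
--         i += 1
--     return i - 1
-- ===== SOURCE B (Python) =====
-- def _least(pred, lo, hi):
--     # binary search: least k in [lo, hi] with pred(k), assuming pred monotone and pred(hi)
--     while lo < hi:
--         mid = (lo + hi) // 2
--         if pred(mid):
--             hi = mid
--         else:
--             lo = mid + 1
--     return lo
--
--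
-- def days_until_empty(c, l):
--     if c <= 0:
--         return -1
--     if l >= 0:
--         if c <= l:
--             return c
--         t = c - l
--         return l + _least(lambda m: m * (m + 1) // 2 >= t, 1, t)
--     return _least(lambda k: k * (k + 1) // 2 - (k + 1) * l >= c, 0, c)
-- ===== Notes on version B (the rewrite author's own statement) =====
-- stated objective: faster
-- what changed: Replaces A's day-by-day simulation of the draining capacity with a case split (drain dominated by leak vs. not) plus a binary search for the first day the closed-form capacity reaches zero.
import Mathlib
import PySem

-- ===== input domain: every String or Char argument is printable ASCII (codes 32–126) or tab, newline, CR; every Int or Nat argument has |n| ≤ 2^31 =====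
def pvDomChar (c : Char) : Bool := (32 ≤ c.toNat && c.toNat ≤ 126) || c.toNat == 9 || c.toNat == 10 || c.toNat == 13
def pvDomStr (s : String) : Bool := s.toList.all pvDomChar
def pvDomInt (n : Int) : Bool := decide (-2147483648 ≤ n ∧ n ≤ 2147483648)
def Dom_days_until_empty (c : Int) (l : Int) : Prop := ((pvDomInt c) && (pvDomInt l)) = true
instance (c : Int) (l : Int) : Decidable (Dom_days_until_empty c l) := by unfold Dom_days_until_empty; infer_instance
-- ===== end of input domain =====

-- B replaces A's day-by-day simulation with a case split plus a binary search for the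
-- first day the closed-form capacity reaches zero (objective: faster, asymptotic).

-- ===== PORT A =====
-- A's while loop: capacity += l; clamp at c; capacity -= i; i += 1; returns i - 1.
def pvLoopA : Nat → Int → Int → Int → Nat → Int
  | 0, _, _, _, i => (i : Int) - 1          -- fuel guard only; proved unreachable for the fuel supplied below
  | fuel + 1, c, l, capacity, i =>
    if 0 < capacity then
      pvLoopA fuel c l ((if capacity + l > c then c else capacity + l) - (i : Int)) (i + 1)
    else (i : Int) - 1

def days_until_empty (c : Int) (l : Int) : Int := pvLoopA (c.toNat + l.toNat + 2) c l c 0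

-- ===== PORT B =====
-- Source B's `_least`: binary search for the least k in [lo, hi] with pred(k) (pred monotone, pred(hi) true).
def pvLeast : Nat → (Int → Bool) → Int → Int → Int
  | 0, _, lo, _ => lo                       -- fuel guard only; proved unreachable for the fuel supplied below
  | fuel + 1, pred, lo, hi =>
    if lo < hi then
      if pred (PySem.Int.floordiv (lo + hi) 2) then
        pvLeast fuel pred lo (PySem.Int.floordiv (lo + hi) 2)
      else pvLeast fuel pred (PySem.Int.floordiv (lo + hi) 2 + 1) hi
    else lo

-- Source B's `m * (m + 1) // 2`
def pvTri (m : Int) : Int := PySem.Int.floordiv (m * (m + 1)) 2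

def days_until_empty_alt (c : Int) (l : Int) : Int :=
  if c ≤ 0 then -1
  else if l ≥ 0 then
    if c ≤ l then c
    else l + pvLeast ((c - l - 1).toNat + 1) (fun m => decide (pvTri m ≥ c - l)) 1 (c - l)
  else pvLeast (c.toNat + 1) (fun k => decide (pvTri k - (k + 1) * l ≥ c)) 0 c

-- ===== PRECONDITION & SPEC =====
def Spec_days_until_empty (c : Int) (l : Int) (out : Int) : Prop := out = days_until_empty_alt c l
instance (c : Int) (l : Int) (out : Int) : Decidable (Spec_days_until_empty c l out) := by unfold Spec_days_until_empty; infer_instance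

-- ===== CLAIM (what is proved, stated in full; the proofs are below) =====
def Claim_equal_days_until_empty : Prop := ∀ (c : Int) (l : Int), Dom_days_until_empty c l → Spec_days_until_empty c l (days_until_empty c l)

-- ===== LEMMAS AND PROOFS =====

theorem pvTri_two (m : Int) : 2 * pvTri m = m * (m + 1) := by
  have hdvd : (2 : Int) ∣ m * (m + 1) := (Int.even_mul_succ_self m).two_dvd
  unfold pvTri
  rw [PySem.Int.floordiv_eq_ediv_of_pos (by norm_num)]
  omega

theorem pvTri_succ (m : Int) : pvTri (m + 1) = pvTri m + (m + 1) := by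
  have h1 := pvTri_two m
  have h2 := pvTri_two (m + 1)
  have h3 : (m + 1) * (m + 1 + 1) = m * (m + 1) + 2 * (m + 1) := by ring
  omega

theorem pvTri_nonneg (m : Int) (hm : 0 ≤ m) : 0 ≤ pvTri m := by
  have h1 := pvTri_two m
  nlinarith

theorem pvTri_mono {a b : Int} (ha : 0 ≤ a) (hab : a ≤ b) : pvTri a ≤ pvTri b := by
  have h1 := pvTri_two a
  have h2 := pvTri_two b
  nlinarith

-- the capacity at the start of iteration k of A's loop
def pvCap (c l : Int) : Nat → Int
  | 0 => c
  | k + 1 => (if pvCap c l k + l > c then c else pvCap c l k + l) - (k : Int)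

theorem pvLoopA_run (c l : Int) : ∀ (d k fuel : Nat), d ≤ fuel →
    (∀ j, j < d → 0 < pvCap c l (k + j)) → pvCap c l (k + d) ≤ 0 →
    pvLoopA fuel c l (pvCap c l k) k = ((k + d : Nat) : Int) - 1 := by
  intro d
  induction d with
  | zero =>
    intro k fuel _ _ hend
    cases fuel with
    | zero => rw [pvLoopA]; omega
    | succ f =>
      rw [pvLoopA, if_neg (by simpa using hend)]
      omega
  | succ d ih =>
    intro k fuel hfuel hpos hend
    cases fuel with
    | zero => omega
    | succ f =>
      have h0 : 0 < pvCap c l k := by simpa using hpos 0 (Nat.succ_pos d)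
      rw [pvLoopA, if_pos h0]
      have hstep : (if pvCap c l k + l > c then c else pvCap c l k + l) - (k : Int)
          = pvCap c l (k + 1) := rfl
      rw [hstep]
      have hrec := ih (k + 1) f (by omega)
        (fun j hj => by
          have h := hpos (j + 1) (by omega)
          have he : k + (j + 1) = k + 1 + j := by omega
          rwa [he] at h)
        (by
          have he : k + (d + 1) = k + 1 + d := by omega
          rwa [he] at hend)
      rw [hrec]
      omega

theorem pvLeast_spec : ∀ (fuel : Nat) (pred : Int → Bool) (lo hi : Int), (hi - lo).toNat < fuel →
    lo ≤ hi → pred hi = true →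
    lo ≤ pvLeast fuel pred lo hi ∧ pvLeast fuel pred lo hi ≤ hi ∧
      pred (pvLeast fuel pred lo hi) = true ∧
      (lo < pvLeast fuel pred lo hi → pred (pvLeast fuel pred lo hi - 1) = false) := by
  intro fuel
  induction fuel with
  | zero => intro pred lo hi hfk; exact absurd hfk (by omega)
  | succ f ih =>
    intro pred lo hi hfk hle hhi
    by_cases h : lo < hi
    · rw [pvLeast, if_pos h]
      have hm1 := PySem.Int.floordiv_mul_add_mod (lo + hi) 2
      have hm2 := PySem.Int.mod_nonneg (lo + hi) (b := 2) (by omega)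
      have hm3 := PySem.Int.mod_lt (lo + hi) (b := 2) (by omega)
      set mid := PySem.Int.floordiv (lo + hi) 2 with hmid
      have hmlo : lo ≤ mid := by omega
      have hmhi : mid < hi := by omega
      by_cases hp : pred mid = true
      · rw [if_pos hp]
        obtain ⟨h1, h2, h3, h4⟩ := ih pred lo mid (by omega) hmlo hp
        exact ⟨h1, by omega, h3, h4⟩
      · rw [if_neg hp]
        obtain ⟨h1, h2, h3, h4⟩ := ih pred (mid + 1) hi (by omega) (by omega) hhi
        refine ⟨by omega, h2, h3, ?_⟩
        intro _
        rcases lt_or_eq_of_le h1 with hlt | heq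
        · exact h4 hlt
        · rw [← heq]
          simp only [add_sub_cancel_right]
          simpa using hp
    · rw [pvLeast, if_neg h]
      have heq : lo = hi := le_antisymm hle (le_of_not_gt h)
      exact ⟨le_refl lo, hle, heq ▸ hhi, fun hlt => absurd hlt (lt_irrefl lo)⟩

theorem pvCap_phase1 (c l : Int) (hl : 0 ≤ l) :
    ∀ k : Nat, 1 ≤ k → (k : Int) ≤ l + 1 → pvCap c l k = c - ((k : Int) - 1) := by
  intro k
  induction k with
  | zero => intro h _; exact absurd h (by omega)
  | succ k ih =>
    intro _ hk
    rcases Nat.eq_zero_or_pos k with h0 | h1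
    · subst h0
      show (if c + l > c then c else c + l) - ((0 : Nat) : Int) = _
      split <;> omega
    · have ih' := ih h1 (by omega)
      show (if pvCap c l k + l > c then c else pvCap c l k + l) - ((k : Nat) : Int) = _
      rw [ih']
      split <;> omega

theorem pvCap_phase2 (c l : Int) (hl : 0 ≤ l) :
    ∀ m : Nat, pvCap c l (l.toNat + 1 + m) = c - l - pvTri (m : Int) := by
  intro m
  induction m with
  | zero =>
    have h1 := pvCap_phase1 c l hl (l.toNat + 1) (by omega) (by omega)
    have h0 : pvTri ((0 : Nat) : Int) = 0 := rfl
    rw [Nat.add_zero, h1, h0]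
    omega
  | succ m ih =>
    have hstep : pvCap c l (l.toNat + 1 + (m + 1))
        = (if pvCap c l (l.toNat + 1 + m) + l > c then c else pvCap c l (l.toNat + 1 + m) + l)
          - ((l.toNat + 1 + m : Nat) : Int) := rfl
    rw [hstep, ih]
    have hnn := pvTri_nonneg (m : Int) (by positivity)
    have hsucc := pvTri_succ (m : Int)
    rw [if_neg (by omega)]
    push_cast at hsucc ⊢
    omega

theorem pvCap_neg (c l : Int) (hl : l < 0) :
    ∀ k : Nat, 1 ≤ k → pvCap c l k = c + (k : Int) * l - pvTri ((k : Int) - 1) := by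
  intro k
  induction k with
  | zero => intro h; exact absurd h (by omega)
  | succ k ih =>
    intro _
    rcases Nat.eq_zero_or_pos k with h0 | h1
    · subst h0
      show (if c + l > c then c else c + l) - ((0 : Nat) : Int) = _
      have h0' : pvTri (((0 + 1 : Nat) : Int) - 1) = 0 := by norm_num [pvTri]
      rw [h0']
      split <;> omega
    · have ih' := ih h1
      show (if pvCap c l k + l > c then c else pvCap c l k + l) - ((k : Nat) : Int) = _
      rw [ih']
      have hnn := pvTri_nonneg ((k : Int) - 1) (by omega)
      have hkl : ((k : Int) + 1) * l ≤ 0 := by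
        have : (0 : Int) ≤ (k : Int) + 1 := by positivity
        nlinarith
      have hsucc := pvTri_succ ((k : Int) - 1)
      have hc1 : (k : Int) - 1 + 1 = (k : Int) := by ring
      rw [hc1] at hsucc
      have hc2 : (((k + 1 : Nat) : Int)) = (k : Int) + 1 := by push_cast; ring
      rw [hc2]
      have hc3 : (k : Int) + 1 - 1 = (k : Int) := by ring
      rw [hc3]
      have hmul : ((k : Int) + 1) * l = (k : Int) * l + l := by ring
      rw [if_neg (by omega)]
      omega

theorem pv_main (c l : Int) : days_until_empty c l = days_until_empty_alt c l := by
  unfold days_until_empty days_until_empty_alt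
  by_cases hc : c ≤ 0
  · rw [if_pos hc]
    have h := pvLoopA_run c l 0 0 (c.toNat + l.toNat + 2) (by omega) (fun j hj => absurd hj (Nat.not_lt_zero j))
      (by simpa [pvCap] using hc)
    simpa [pvCap] using h
  · rw [if_neg hc]
    rw [not_le] at hc
    by_cases hl : 0 ≤ l
    · rw [if_pos hl]
      by_cases hcl : c ≤ l
      · rw [if_pos hcl]
        have hpos : ∀ j, j < c.toNat + 1 → 0 < pvCap c l (0 + j) := by
          intro j hj
          rw [Nat.zero_add]
          rcases Nat.eq_zero_or_pos j with h0 | h1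
          · subst h0; simpa [pvCap] using hc
          · rw [pvCap_phase1 c l hl j h1 (by omega)]
            omega
        have hend : pvCap c l (0 + (c.toNat + 1)) ≤ 0 := by
          rw [Nat.zero_add, pvCap_phase1 c l hl (c.toNat + 1) (by omega) (by omega)]
          omega
        have h := pvLoopA_run c l (c.toNat + 1) 0 (c.toNat + l.toNat + 2) (by omega) hpos hend
        rw [show pvCap c l 0 = c from rfl] at h
        rw [h]
        omega
      · rw [if_neg hcl]
        have htpos : (1 : Int) ≤ c - l := by omega
        have hpredt : (fun m => decide (pvTri m ≥ c - l)) (c - l) = true := by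
          simp only [decide_eq_true_eq, ge_iff_le]
          have h2 := pvTri_two (c - l)
          nlinarith
        obtain ⟨h1, h2, h3, h4⟩ :=
          pvLeast_spec ((c - l - 1).toNat + 1) (fun m => decide (pvTri m ≥ c - l)) 1 (c - l)
            (by omega) htpos hpredt
        set r := pvLeast ((c - l - 1).toNat + 1) (fun m => decide (pvTri m ≥ c - l)) 1 (c - l) with hr
        simp only [decide_eq_true_eq, ge_iff_le] at h3
        have hmin : ∀ j : Int, 1 ≤ j → j < r → pvTri j < c - l := by
          intro j hj1 hjr
          by_contra hge
          rw [not_lt] at hge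
          have hmono := pvTri_mono (a := j) (b := r - 1) (by omega) (by omega)
          have h5 := h4 (by omega)
          simp only [decide_eq_false_iff_not, ge_iff_le, not_le] at h5
          omega
        have hpos : ∀ j, j < l.toNat + 1 + r.toNat → 0 < pvCap c l (0 + j) := by
          intro j hj
          rw [Nat.zero_add]
          rcases Nat.eq_zero_or_pos j with h0 | h1
          · subst h0; simpa [pvCap] using hc
          · by_cases hjl : (j : Int) ≤ l + 1
            · rw [pvCap_phase1 c l hl j h1 hjl]
              omega
            · have hm : j = l.toNat + 1 + (j - (l.toNat + 1)) := by omega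
              rw [hm, pvCap_phase2 c l hl]
              have h6 := hmin ((j - (l.toNat + 1) : Nat) : Int) (by omega) (by omega)
              omega
        have hend : pvCap c l (0 + (l.toNat + 1 + r.toNat)) ≤ 0 := by
          rw [Nat.zero_add, pvCap_phase2 c l hl]
          have hcast : ((r.toNat : Nat) : Int) = r := Int.toNat_of_nonneg (by omega)
          rw [hcast]
          omega
        have h := pvLoopA_run c l (l.toNat + 1 + r.toNat) 0 (c.toNat + l.toNat + 2) (by omega) hpos hend
        rw [show pvCap c l 0 = c from rfl] at h
        rw [h]
        omega
    · rw [if_neg hl]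
      rw [not_le] at hl
      have hpredc : (fun k => decide (pvTri k - (k + 1) * l ≥ c)) c = true := by
        simp only [decide_eq_true_eq, ge_iff_le]
        have hnn := pvTri_nonneg c (by omega)
        have hmul : (c + 1) * 1 ≤ (c + 1) * (-l) :=
          mul_le_mul_of_nonneg_left (by omega) (by omega)
        nlinarith
      obtain ⟨h1, h2, h3, h4⟩ :=
        pvLeast_spec (c.toNat + 1) (fun k => decide (pvTri k - (k + 1) * l ≥ c)) 0 c
          (by omega) (by omega) hpredc
      set r := pvLeast (c.toNat + 1) (fun k => decide (pvTri k - (k + 1) * l ≥ c)) 0 c with hr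
      simp only [decide_eq_true_eq, ge_iff_le] at h3
      have hmin : ∀ j : Int, 0 ≤ j → j < r → pvTri j - (j + 1) * l < c := by
        intro j hj0 hjr
        by_contra hge
        rw [not_lt] at hge
        have hmono := pvTri_mono (a := j) (b := r - 1) hj0 (by omega)
        have h5 := h4 (by omega)
        simp only [decide_eq_false_iff_not, ge_iff_le, not_le] at h5
        have hmul : (j + 1) * l - (r - 1 + 1) * l = (r - 1 - j) * (-l) := by ring
        have hnn2 : (0 : Int) ≤ (r - 1 - j) * (-l) :=
          mul_nonneg (by omega) (by omega)
        omega
      have hpos : ∀ j, j < r.toNat + 1 → 0 < pvCap c l (0 + j) := by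
        intro j hj
        rw [Nat.zero_add]
        rcases Nat.eq_zero_or_pos j with h0 | h1
        · subst h0; simpa [pvCap] using hc
        · rw [pvCap_neg c l hl j h1]
          have h6 := hmin ((j : Int) - 1) (by omega) (by omega)
          have hc1 : (j : Int) - 1 + 1 = (j : Int) := by ring
          rw [hc1] at h6
          omega
      have hend : pvCap c l (0 + (r.toNat + 1)) ≤ 0 := by
        rw [Nat.zero_add, pvCap_neg c l hl (r.toNat + 1) (by omega)]
        have hcast : (((r.toNat + 1 : Nat)) : Int) = r + 1 := by omega
        rw [hcast]
        have hc3 : r + 1 - 1 = r := by ring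
        rw [hc3]
        omega
      have h := pvLoopA_run c l (r.toNat + 1) 0 (c.toNat + l.toNat + 2) (by omega) hpos hend
      rw [show pvCap c l 0 = c from rfl] at h
      rw [h]
      omega

-- ===== VERDICT (by name: the statement is the Claim_ definition above) =====
theorem days_until_empty_spec : Claim_equal_days_until_empty := by
  intro c l _
  unfold Spec_days_until_empty
  exact pv_main c l
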